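-- pv_equiv track=rewrite | github.com/lonelyarcher/leetcode.python3 | UF_Count_1267_CountServerthatCommunicate.py | countServers_UF
-- ===== SOURCE A (Python) =====
-- import collections
-- from typing import List
--
-- def countServers_UF(grid: List[List[int]]) -> int:
--     """ UF on all cells,
--     1. UF on N nodes from 0 to N-1 or 1 to N which has connection
--     2. UF on all nodes include those empty cells which will not has connection. It is fine it just connect to itself which need exclude in collecting steps
--     3. UF on a map of object/string/int, not continuous number.
--     All three are fine for UF, you can choose upon the question, here we choose the second one which looks easy to implements
--     """
--     m, n = len(grid), len(grid[0])
--     p = [i for i in range(m * n)]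
--     def find(i):
--         if p[i] != i: p[i] = find(p[i])
--         return p[i]
--     def union(i, j):
--         p[find(i)] = find(j)
--     for i in range(m):
--         prev = None
--         for j in range(n):
--             if grid[i][j] == 1:
--                 if prev == None: prev = i * n + j # be careful for zero is also false value, prev can be 0, so condition can't be "if prev: "
--                 else: union(prev, i * n + j)
--     for j in range(n):
--         prev = None
--         for i in range(m):
--             if grid[i][j] == 1:
--                 if prev == None: prev = i * n + j
--                 else: union(prev, i * n + j)
--     counter = collections.Counter(find(i * n + j) for i in range(m) for j in range(n))
--     return sum(v for k,v in counter.items() if v > 1)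
-- ===== SOURCE B (Python) =====
-- from typing import List
--
-- def countServers_UF(grid: List[List[int]]) -> int:
--     """Row/column server-count tables instead of union-find: a server
--     communicates iff its row or its column holds more than one server."""
--     n = len(grid[0])
--     row_cnt = [sum(1 for j in range(n) if row[j] == 1) for row in grid]
--     col_cnt = [sum(1 for row in grid if row[j] == 1) for j in range(n)]
--     return sum(1 for rc, row in zip(row_cnt, grid)
--                  for j in range(n)
--                  if row[j] == 1 and (rc > 1 or col_cnt[j] > 1))
-- ===== Notes on version B (the rewrite author's own statement) =====
-- stated objective: faster
-- what changed: Replaces the union-find over all m*n cells (two union passes, recursive find with path compression, Counter of roots, sum of component sizes > 1) by two direct count tables: per-row and per-column server counts computed in one pass each, then counting the servers whose row or column count exceeds 1.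
import Mathlib
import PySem

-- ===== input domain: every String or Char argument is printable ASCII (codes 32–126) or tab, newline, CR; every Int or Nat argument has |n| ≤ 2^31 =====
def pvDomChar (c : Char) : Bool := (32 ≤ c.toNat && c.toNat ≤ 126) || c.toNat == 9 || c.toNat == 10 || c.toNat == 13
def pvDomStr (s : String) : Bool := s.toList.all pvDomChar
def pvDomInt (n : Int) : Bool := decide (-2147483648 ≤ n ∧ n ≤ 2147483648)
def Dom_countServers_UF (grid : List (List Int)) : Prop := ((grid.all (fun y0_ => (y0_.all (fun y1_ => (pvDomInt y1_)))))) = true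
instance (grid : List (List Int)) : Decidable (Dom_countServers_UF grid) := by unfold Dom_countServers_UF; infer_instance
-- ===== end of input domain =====

-- B replaces A's union-find over all cells with per-row/per-column server-count tables (measured faster; constant factor).
-- ===== PORT A =====
-- find with path compression; Python's recursion terminates because the parent forest stays
-- acyclic — ported with fuel p.length, proved sufficient in pvFind_spec below
def pvFind : Nat → List Nat → Nat → Nat × List Nat
  | 0, p, i => (p.getD i i, p)
  | fuel+1, p, i =>
    if p.getD i i = i then (i, p)
    else
      let res := pvFind fuel p (p.getD i i)
      (res.1, res.2.set i res.1)

-- union(a, b): p[find(a)] = find(b); Python evaluates the right-hand side find(b) first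
def pvUnion (p : List Nat) (a b : Nat) : List Nat :=
  let rb := pvFind p.length p b
  let ra := pvFind rb.2.length rb.2 a
  ra.2.set ra.1 rb.1

-- one inner loop of either pass: 'prev = None; for t in range(K): if <server at cell f t>: ...'
-- (A's row loop and column loop are this same loop with different cell encodings f)
def pvLine (p : List Nat) (b : Nat → Bool) (f : Nat → Nat) (K : Nat) : List Nat × Option Nat :=
  (List.range K).foldl (fun s t =>
    if b t then
      match s.2 with
      | none => (s.1, some (f t))
      | some prev => (pvUnion s.1 prev (f t), some prev)
    else s) (p, none)

def countServers_UF (grid : List (List Int)) : Int :=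
  let m := grid.length
  let n := (grid.headD []).length
  let p0 := List.range (m * n)
  let p1 := (List.range m).foldl
    (fun p i => (pvLine p (fun j => (grid.getD i []).getD j 0 == 1) (fun j => i * n + j) n).1) p0
  let p2 := (List.range n).foldl
    (fun p j => (pvLine p (fun i => (grid.getD i []).getD j 0 == 1) (fun i => i * n + j) m).1) p1
  let rs := (List.range m).foldl (fun (s : List Nat × List Nat) i =>
      (List.range n).foldl (fun (s : List Nat × List Nat) j =>
        let r := pvFind s.2.length s.2 (i * n + j)
        (s.1 ++ [r.1], r.2)) s) ([], p2)
  let cnt := PySem.Dict.counter rs.1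
  cnt.items.foldl (fun acc kv => if 1 < kv.2 then acc + kv.2 else acc) 0

-- ===== PORT B =====
def countServers_UF_alt (grid : List (List Int)) : Int :=
  let n := (grid.headD []).length
  let rowCnt := grid.map (fun row => ((List.range n).filter (fun j => row.getD j 0 == 1)).length)
  let colCnt := (List.range n).map (fun j => (grid.filter (fun row => row.getD j 0 == 1)).length)
  Int.ofNat (((rowCnt.zip grid).map (fun rr =>
      ((List.range n).filter (fun j => rr.2.getD j 0 == 1 &&
          (decide (1 < rr.1) || decide (1 < colCnt.getD j 0)))).length)).sum)

-- ===== PRECONDITION & SPEC =====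
-- Pre_ excludes exactly the inputs where A raises (IndexError): the empty grid (grid[0]),
-- and grids with some row shorter than the first row (read grid[i][j] for j < n)
def Pre_countServers_UF (grid : List (List Int)) : Prop :=
  grid ≠ [] ∧ ∀ row ∈ grid, (grid.headD []).length ≤ row.length
instance (grid : List (List Int)) : Decidable (Pre_countServers_UF grid) := by
  unfold Pre_countServers_UF; infer_instance
def pvWitness_countServers_UF : List (List Int) := [[1, 0], [1, 1]]
def Spec_countServers_UF (grid : List (List Int)) (out : Int) : Prop := out = countServers_UF_alt grid
instance (grid : List (List Int)) (out : Int) : Decidable (Spec_countServers_UF grid out) := by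
  unfold Spec_countServers_UF; infer_instance

-- ===== CLAIM (what is proved, stated in full; the proofs are below) =====
def Claim_equal_countServers_UF : Prop := ∀ (grid : List (List Int)), Dom_countServers_UF grid → Pre_countServers_UF grid → Spec_countServers_UF grid (countServers_UF grid)

-- ===== LEMMAS AND PROOFS =====
def pvStep (p : List Nat) (i : Nat) : Nat := p.getD i i

def pvIsRoot (p : List Nat) (r : Nat) : Prop := pvStep p r = r

def pvRoot (p : List Nat) (i : Nat) : Nat := (pvStep p)^[p.length] i

def pvValid (p : List Nat) : Prop :=
  (∀ i, i < p.length → pvStep p i < p.length) ∧ ∀ i, ∃ k, pvIsRoot p ((pvStep p)^[k] i)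

lemma pvStep_ge {p : List Nat} {i : Nat} (h : p.length ≤ i) : pvStep p i = i := by
  simp [pvStep, List.getD_eq_getElem?_getD, List.getElem?_eq_none (by omega : p.length ≤ i)]

lemma pvIter_root {p : List Nat} {r : Nat} (h : pvIsRoot p r) (d : Nat) :
    (pvStep p)^[d] r = r := by
  induction d with
  | zero => rfl
  | succ d ih => rw [Function.iterate_succ_apply, h, ih]

lemma pvPersist {p : List Nat} {x k : Nat} (h : pvIsRoot p ((pvStep p)^[k] x)) {t : Nat}
    (ht : k ≤ t) : (pvStep p)^[t] x = (pvStep p)^[k] x := by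
  obtain ⟨d, rfl⟩ := Nat.exists_eq_add_of_le ht
  rw [Nat.add_comm, Function.iterate_add_apply, pvIter_root h]

lemma pvIter_lt {p : List Nat} (hB : ∀ i, i < p.length → pvStep p i < p.length)
    {x : Nat} (hx : x < p.length) (k : Nat) : (pvStep p)^[k] x < p.length := by
  induction k with
  | zero => exact hx
  | succ k ih => rw [Function.iterate_succ_apply']; exact hB _ ih

lemma pvDist_le {p : List Nat} (hV : pvValid p) (x : Nat) :
    ∃ k ≤ p.length, pvIsRoot p ((pvStep p)^[k] x) := by
  by_cases hx : x < p.length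
  · have hex := hV.2 x
    have hdec : DecidablePred fun k => pvIsRoot p ((pvStep p)^[k] x) := by
      intro k; unfold pvIsRoot; infer_instance
    classical
    set K := Nat.find hex with hK
    have hKroot : pvIsRoot p ((pvStep p)^[K] x) := Nat.find_spec hex
    by_cases hKle : K ≤ p.length
    · exact ⟨K, hKle, hKroot⟩
    · exfalso
      -- the iterates (pvStep p)^[t] x for t ≤ K are pairwise distinct, all < p.length
      have hinj : Set.InjOn (fun t => (pvStep p)^[t] x) (Finset.range (K + 1)) := by
        intro a ha b hb hab
        simp only [Finset.coe_range, Set.mem_Iio] at ha hb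
        by_contra hne
        -- wlog a < b
        rcases Nat.lt_or_ge a b with hlt | hge
        · -- periodicity: s^[a + t*(b-a)] x = s^[a] x
          have hper : ∀ t, (pvStep p)^[a + t * (b - a)] x = (pvStep p)^[a] x := by
            intro t
            induction t with
            | zero => simp
            | succ t ih =>
              have : a + (t + 1) * (b - a) = (b - a) + (a + t * (b - a)) := by ring
              rw [this, Function.iterate_add_apply, ih, ← Function.iterate_add_apply]
              have : b - a + a = b := by omega
              rw [this]; exact hab.symm
          have hbig : K ≤ a + K * (b - a) := by
            have : 1 ≤ b - a := by omega
            calc K ≤ K * (b - a) := Nat.le_mul_of_pos_right _ (by omega)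
            _ ≤ a + K * (b - a) := by omega
          have := pvPersist hKroot hbig
          rw [hper K] at this
          have : pvIsRoot p ((pvStep p)^[a] x) := by rw [this]; exact hKroot
          have hfa : Nat.find hex ≤ a := Nat.find_le this
          omega
        · rcases Nat.lt_or_ge b a with hlt | hge2
          · have hper : ∀ t, (pvStep p)^[b + t * (a - b)] x = (pvStep p)^[b] x := by
              intro t
              induction t with
              | zero => simp
              | succ t ih =>
                have : b + (t + 1) * (a - b) = (a - b) + (b + t * (a - b)) := by ring
                rw [this, Function.iterate_add_apply, ih, ← Function.iterate_add_apply]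
                have : a - b + b = a := by omega
                rw [this]; exact hab
            have hbig : K ≤ b + K * (a - b) := by
              calc K ≤ K * (a - b) := Nat.le_mul_of_pos_right _ (by omega)
              _ ≤ b + K * (a - b) := by omega
            have := pvPersist hKroot hbig
            rw [hper K] at this
            have : pvIsRoot p ((pvStep p)^[b] x) := by rw [this]; exact hKroot
            have hfb : Nat.find hex ≤ b := Nat.find_le this
            omega
          · omega
      have hmaps : ∀ t ∈ Finset.range (K + 1), (pvStep p)^[t] x ∈ Finset.range p.length := by
        intro t _; simp only [Finset.mem_range]; exact pvIter_lt hV.1 hx t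
      have := Finset.card_le_card_of_injOn _ hmaps hinj
      simp only [Finset.card_range] at this
      omega
  · refine ⟨0, Nat.zero_le _, ?_⟩
    rw [Function.iterate_zero_apply]
    exact pvStep_ge (Nat.le_of_not_lt hx)

lemma pvRoot_isRoot {p : List Nat} (hV : pvValid p) (x : Nat) : pvIsRoot p (pvRoot p x) := by
  obtain ⟨k, hk, hr⟩ := pvDist_le hV x
  rw [pvRoot, pvPersist hr hk]; exact hr

lemma pvRoot_of_isRoot {p : List Nat} {x : Nat} (h : pvIsRoot p x) : pvRoot p x = x :=
  pvIter_root h _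

lemma pvRoot_step {p : List Nat} (hV : pvValid p) (x : Nat) :
    pvRoot p (pvStep p x) = pvRoot p x := by
  have h1 : pvRoot p (pvStep p x) = (pvStep p)^[p.length + 1] x := by
    rw [pvRoot, ← Function.iterate_succ_apply]
  rw [h1, Function.iterate_succ_apply']
  exact pvRoot_isRoot hV x

lemma pvRoot_unique {p : List Nat} (hV : pvValid p) {x k r : Nat}
    (hreach : (pvStep p)^[k] x = r) (hr : pvIsRoot p r) : pvRoot p x = r := by
  have h1 : (pvStep p)^[k + p.length] x = r := by
    rw [Nat.add_comm, Function.iterate_add_apply, hreach, pvIter_root hr]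
  have h2 : (pvStep p)^[k + p.length] x = pvRoot p x := by
    rw [Function.iterate_add_apply, pvRoot]
    exact pvIter_root (pvRoot_isRoot hV x) k
  rw [← h1, h2]

lemma pvRoot_lt {p : List Nat} (hV : pvValid p) {x : Nat} (hx : x < p.length) :
    pvRoot p x < p.length := pvIter_lt hV.1 hx _

lemma pvStep_set {p : List Nat} {a : Nat} (b : Nat) (ha : a < p.length) (x : Nat) :
    pvStep (p.set a b) x = if x = a then b else pvStep p x := by
  by_cases hx : x = a
  · subst hx
    simp [pvStep, List.getD_eq_getElem?_getD, ha]
  · simp [pvStep, List.getD_eq_getElem?_getD, List.getElem?_set_ne (by omega : a ≠ x), hx]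

lemma pvSetEdge {p : List Nat} {a b : Nat} (hV : pvValid p) (ha : a < p.length)
    (hb : b < p.length) (hbr : pvIsRoot p b)
    (hside : pvIsRoot p a ∨ pvRoot p a = b) :
    pvValid (p.set a b) ∧ (p.set a b).length = p.length ∧
      ∀ x, pvRoot (p.set a b) x = if pvRoot p x = a then b else pvRoot p x := by
  set q := p.set a b with hq
  have hlen : q.length = p.length := by simp [hq]
  have hstep : ∀ x, pvStep q x = if x = a then b else pvStep p x := pvStep_set b ha
  have hbroot : pvIsRoot q b := by
    unfold pvIsRoot
    rw [hstep b]
    by_cases hba : b = a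
    · simp [hba]
    · simp [hba]; exact hbr
  have hacy : ∀ k x, pvIsRoot p ((pvStep p)^[k] x) → ∃ k', pvIsRoot q ((pvStep q)^[k'] x) := by
    intro k
    induction k using Nat.strong_induction_on with
    | _ k ih =>
      intro x hx
      by_cases hxa : x = a
      · subst hxa
        exact ⟨1, by rw [Function.iterate_one, hstep, if_pos rfl]; exact hbroot⟩
      · by_cases hroot : pvStep p x = x
        · exact ⟨0, by rw [Function.iterate_zero_apply]; unfold pvIsRoot; rw [hstep, if_neg hxa]; exact hroot⟩
        · match k, hx with
          | 0, hx => exact absurd hx hroot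
          | k + 1, hx =>
            rw [Function.iterate_succ_apply] at hx
            obtain ⟨k', hk'⟩ := ih k (by omega) (pvStep p x) hx
            exact ⟨k' + 1, by rw [Function.iterate_succ_apply, hstep, if_neg hxa]; exact hk'⟩
  have hV' : pvValid q := by
    constructor
    · intro i hi
      rw [hstep i]
      split_ifs
      · omega
      · rw [hlen] at hi ⊢; exact hV.1 i hi
    · intro x
      obtain ⟨k, hk⟩ := hV.2 x
      exact hacy k x hk
  refine ⟨hV', hlen, ?_⟩
  have hRHSa : (if pvRoot p a = a then b else pvRoot p a) = b := by
    split_ifs with h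
    · rfl
    · rcases hside with hs | hs
      · exact absurd (pvRoot_of_isRoot hs) h
      · exact hs
  have main : ∀ k x, pvIsRoot p ((pvStep p)^[k] x) →
      pvRoot q x = if pvRoot p x = a then b else pvRoot p x := by
    intro k
    induction k using Nat.strong_induction_on with
    | _ k ih =>
      intro x hx
      by_cases hxa : x = a
      · subst hxa
        have h1 : pvRoot q x = b := by
          refine pvRoot_unique hV' (k := 1) ?_ hbroot
          rw [Function.iterate_one, hstep, if_pos rfl]
        rw [h1, hRHSa]
      · by_cases hroot : pvStep p x = x
        · have h1 : pvRoot q x = x := by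
            refine pvRoot_of_isRoot ?_
            unfold pvIsRoot
            rw [hstep, if_neg hxa]; exact hroot
          have h2 : pvRoot p x = x := pvRoot_of_isRoot hroot
          rw [h1, h2, if_neg hxa]
        · match k, hx with
          | 0, hx => exact absurd hx hroot
          | k + 1, hx =>
            rw [Function.iterate_succ_apply] at hx
            have h1 : pvRoot q x = pvRoot q (pvStep p x) := by
              rw [← pvRoot_step hV' x, hstep, if_neg hxa]
            have h2 : pvRoot p x = pvRoot p (pvStep p x) := (pvRoot_step hV x).symm
            rw [h1, h2]
            exact ih k (by omega) (pvStep p x) hx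
  intro x
  obtain ⟨k, hk⟩ := hV.2 x
  exact main k x hk

lemma pvFind_spec : ∀ k fuel (p : List Nat) (i : Nat), pvValid p →
    pvIsRoot p ((pvStep p)^[k] i) → k ≤ fuel →
    (pvFind fuel p i).1 = pvRoot p i ∧ pvValid (pvFind fuel p i).2 ∧
      (pvFind fuel p i).2.length = p.length ∧
      ∀ x, pvRoot (pvFind fuel p i).2 x = pvRoot p x := by
  intro k
  induction k using Nat.strong_induction_on with
  | _ k ih =>
    intro fuel p i hV hk hkf
    by_cases hroot : pvStep p i = i
    · have h1 : pvFind fuel p i = (i, p) := by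
        cases fuel with
        | zero => simp [pvFind]; exact hroot
        | succ f => simp only [pvFind]; rw [if_pos (show p.getD i i = i from hroot)]
      rw [h1]
      exact ⟨(pvRoot_of_isRoot hroot).symm, hV, rfl, fun _ => rfl⟩
    · match k, hk with
      | 0, hk => exact absurd hk hroot
      | k + 1, hk =>
        match fuel, hkf with
        | fuel + 1, hkf =>
          rw [Function.iterate_succ_apply] at hk
          obtain ⟨ih1, ih2, ih3, ih4⟩ := ih k (by omega) fuel p (pvStep p i) hV hk (by omega)
          have hilt : i < p.length := by
            by_contra h
            exact hroot (pvStep_ge (by omega))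
          set res := pvFind fuel p (pvStep p i) with hres
          have hfind : pvFind (fuel + 1) p i = (res.1, res.2.set i res.1) := by
            simp only [pvFind]
            rw [if_neg (show ¬p.getD i i = i from hroot)]
            rfl
          have hri : res.1 = pvRoot p i := by rw [ih1, pvRoot_step hV]
          have hroots : pvIsRoot res.2 res.1 := by
            have h := pvRoot_isRoot ih2 i
            rw [ih4 i, ← hri] at h
            exact h
          have hset := pvSetEdge ih2 (by omega : i < res.2.length)
            (by rw [ih3, hri]; exact pvRoot_lt hV hilt) hroots
            (Or.inr (by rw [ih4 i, hri]))
          obtain ⟨hs1, hs2, hs3⟩ := hset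
          rw [hfind]
          refine ⟨hri, hs1, by rw [hs2, ih3], ?_⟩
          intro x
          have h4 : pvRoot (res.2.set i res.1) x = if pvRoot res.2 x = i then res.1 else pvRoot res.2 x := hs3 x
          have h5 : pvRoot res.2 x ≠ i := by
            rw [ih4 x]
            intro hcon
            have := pvRoot_isRoot hV x
            rw [hcon] at this
            exact hroot this
          rw [h4, if_neg h5, ih4 x]

lemma pvFind_top (p : List Nat) (i : Nat) (hV : pvValid p) :
    (pvFind p.length p i).1 = pvRoot p i ∧ pvValid (pvFind p.length p i).2 ∧
      (pvFind p.length p i).2.length = p.length ∧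
      ∀ x, pvRoot (pvFind p.length p i).2 x = pvRoot p x := by
  obtain ⟨k, hkle, hk⟩ := pvDist_le hV i
  exact pvFind_spec k p.length p i hV hk hkle

lemma pvUnion_spec {p : List Nat} (hV : pvValid p) {a b : Nat}
    (ha : a < p.length) (hb : b < p.length) :
    pvValid (pvUnion p a b) ∧ (pvUnion p a b).length = p.length ∧
      ∀ x, pvRoot (pvUnion p a b) x =
        if pvRoot p x = pvRoot p a then pvRoot p b else pvRoot p x := by
  obtain ⟨hb1, hb2, hb3, hb4⟩ := pvFind_top p b hV
  set rb := pvFind p.length p b with hrb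
  obtain ⟨ha1, ha2, ha3, ha4⟩ := pvFind_top rb.2 a hb2
  have hfuel : rb.2.length = p.length := hb3
  set ra := pvFind rb.2.length rb.2 a with hra
  have hra1 : ra.1 = pvRoot p a := by rw [ha1, hb4]
  have hrb1 : rb.1 = pvRoot p b := hb1
  have hU : pvUnion p a b = ra.2.set ra.1 rb.1 := rfl
  have hisb : pvIsRoot ra.2 rb.1 := by
    have := pvRoot_isRoot ha2 b
    rw [ha4, hb4, ← hrb1] at this
    exact this
  have hisa : pvIsRoot ra.2 ra.1 := by
    have := pvRoot_isRoot ha2 a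
    rw [ha4, hb4, ← hra1] at this
    exact this
  have hset := pvSetEdge ha2
    (by rw [ha3, hb3, hra1]; exact pvRoot_lt hV ha)
    (by rw [ha3, hb3, hrb1]; exact pvRoot_lt hV hb) hisb (Or.inl hisa)
  obtain ⟨hs1, hs2, hs3⟩ := hset
  rw [hU]
  refine ⟨hs1, by rw [hs2, ha3, hb3], ?_⟩
  intro x
  rw [hs3 x, ha4, hb4, hra1, hrb1]

def pvNtv (p : List Nat) (c : Nat) : Prop :=
  ∃ d, d < p.length ∧ d ≠ c ∧ pvRoot p d = pvRoot p c

def pvSgl (p : List Nat) (x : Nat) : Prop :=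
  pvRoot p x = x ∧ ∀ d, d < p.length → d ≠ x → pvRoot p d ≠ x

lemma pvUnion_Ntv {p : List Nat} (hV : pvValid p) {a b : Nat}
    (ha : a < p.length) (hb : b < p.length) {c : Nat} (h : pvNtv p c) :
    pvNtv (pvUnion p a b) c := by
  obtain ⟨_, hlen, hroot⟩ := pvUnion_spec hV ha hb
  obtain ⟨d, hd1, hd2, hd3⟩ := h
  exact ⟨d, by omega, hd2, by rw [hroot d, hroot c, hd3]⟩

lemma pvUnion_newNtv {p : List Nat} (hV : pvValid p) {a b : Nat}
    (ha : a < p.length) (hb : b < p.length) (hab : a ≠ b) :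
    pvNtv (pvUnion p a b) a ∧ pvNtv (pvUnion p a b) b := by
  obtain ⟨_, hlen, hroot⟩ := pvUnion_spec hV ha hb
  have h1 : pvRoot (pvUnion p a b) a = pvRoot p b := by
    rw [hroot a, if_pos rfl]
  have h2 : pvRoot (pvUnion p a b) b = pvRoot p b := by
    rw [hroot b]; split_ifs <;> rfl
  exact ⟨⟨b, by omega, hab.symm, by rw [h1, h2]⟩, ⟨a, by omega, hab, by rw [h1, h2]⟩⟩

lemma pvUnion_Sgl {p : List Nat} (hV : pvValid p) {a b : Nat}
    (ha : a < p.length) (hb : b < p.length) {x : Nat} (hax : a ≠ x) (hbx : b ≠ x)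
    (h : pvSgl p x) : pvSgl (pvUnion p a b) x := by
  obtain ⟨_, hlen, hroot⟩ := pvUnion_spec hV ha hb
  have hrb : pvRoot p b ≠ x := h.2 b hb hbx
  constructor
  · rw [hroot x, h.1]
    have : pvRoot p a ≠ x := h.2 a ha hax
    rw [if_neg (by omega)]
  · intro d hd hdx
    rw [hroot d]
    split_ifs with hcase
    · exact hrb
    · exact h.2 d (by omega) hdx

lemma pvLine_spec (p : List Nat) (b : Nat → Bool) (f : Nat → Nat) (K : Nat)
    (hV : pvValid p)
    (hf : ∀ t, t < K → b t = true → f t < p.length)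
    (hinj : ∀ t₁ t₂, t₁ < K → t₂ < K → t₁ ≠ t₂ → b t₁ = true → b t₂ = true → f t₁ ≠ f t₂) :
    pvValid (pvLine p b f K).1 ∧ (pvLine p b f K).1.length = p.length ∧
    (pvLine p b f K).2 = ((List.range K).find? b).map f ∧
    (((List.range K).filter b).length ≤ 1 → (pvLine p b f K).1 = p) ∧
    (∀ x, pvNtv p x → pvNtv (pvLine p b f K).1 x) ∧
    (∀ t, t < K → b t = true → 2 ≤ ((List.range K).filter b).length →
      pvNtv (pvLine p b f K).1 (f t)) ∧
    (∀ x, pvSgl p x → (∀ t, t < K → b t = true → f t ≠ x) → pvSgl (pvLine p b f K).1 x) := by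
  induction K with
  | zero =>
    refine ⟨hV, rfl, by simp [pvLine], fun _ => rfl, fun x h => h, ?_, fun x h _ => h⟩
    intro t ht
    omega
  | succ K IH =>
    obtain ⟨ih1, ih2, ih3, ih4, ih5, ih6, ih7⟩ := IH
      (fun t ht hb => hf t (by omega) hb)
      (fun t₁ t₂ h1 h2 h3 h4 h5 => hinj t₁ t₂ (by omega) (by omega) h3 h4 h5)
    set r := pvLine p b f K with hr
    have hunf : pvLine p b f (K+1) =
        (if b K then
          match r.2 with
          | none => (r.1, some (f K))
          | some prev => (pvUnion r.1 prev (f K), some prev)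
        else r) := by
      unfold pvLine
      rw [List.range_succ, List.foldl_append, List.foldl_cons, List.foldl_nil]
      rfl
    by_cases hbK : b K = true
    · rcases hprev : r.2 with _ | v
      · -- no server yet in this line: p unchanged, prev set
        have hnone : (List.range K).find? b = none := by
          rcases hcon : (List.range K).find? b with _ | t0
          · rfl
          · rw [ih3, hcon] at hprev; simp at hprev
        have hfilK : (List.range K).filter b = [] := by
          rw [List.filter_eq_nil_iff]
          intro t ht
          have := List.find?_eq_none.mp hnone t ht
          simpa using this
        have hcnt0 : ((List.range K).filter b).length = 0 := by rw [hfilK]; rfl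
        have hp : r.1 = p := ih4 (by omega)
        have hres : pvLine p b f (K+1) = (r.1, some (f K)) := by
          rw [hunf, if_pos hbK, hprev]
        have hfil : (List.range (K+1)).filter b = [K] := by
          rw [List.range_succ, List.filter_append, hfilK]
          simp [hbK]
        have hfind : (List.range (K+1)).find? b = some K := by
          rw [List.range_succ, List.find?_append, hnone]
          simp [hbK]
        rw [hres]
        refine ⟨ih1, ih2, ?_, fun _ => hp, ih5, ?_, fun x hx _ => by rw [hp]; exact hx⟩
        · simp [hfind]
        · intro t ht hbt h2
          rw [hfil] at h2
          simp at h2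
      · -- v = f t0 is the first server of the line: union it with the new cell f K
        obtain ⟨t0, ht0find, hvt0⟩ : ∃ t0, (List.range K).find? b = some t0 ∧ v = f t0 := by
          rcases hcon : (List.range K).find? b with _ | t0
          · rw [ih3, hcon] at hprev; simp at hprev
          · rw [ih3, hcon] at hprev
            simp at hprev
            exact ⟨t0, rfl, hprev.symm⟩
        have ht0K : t0 < K := by
          have := List.mem_of_find?_eq_some ht0find
          simpa using this
        have hbt0 : b t0 = true := List.find?_some ht0find
        have hres : pvLine p b f (K+1) = (pvUnion r.1 v (f K), some v) := by
          rw [hunf, if_pos hbK, hprev]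
        have hva : f t0 < r.1.length := by rw [ih2]; exact hf t0 (by omega) hbt0
        have hfKb : f K < r.1.length := by rw [ih2]; exact hf K (by omega) hbK
        have hne : f t0 ≠ f K := hinj t0 K (by omega) (by omega) (by omega) hbt0 hbK
        have ht0mem : t0 ∈ (List.range K).filter b := by
          rw [List.mem_filter]
          exact ⟨by simpa using ht0K, hbt0⟩
        have hcnt1 : 1 ≤ ((List.range K).filter b).length := by
          have := List.length_pos_of_mem ht0mem
          omega
        have hfil : (List.range (K+1)).filter b = (List.range K).filter b ++ [K] := by
          rw [List.range_succ, List.filter_append]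
          simp [hbK]
        have hcntS : ((List.range (K+1)).filter b).length =
            ((List.range K).filter b).length + 1 := by
          rw [hfil, List.length_append]; rfl
        have hfind : (List.range (K+1)).find? b = some t0 := by
          rw [List.range_succ, List.find?_append, ht0find]; rfl
        subst hvt0
        obtain ⟨hu1, hu2, _⟩ := pvUnion_spec ih1 hva hfKb
        rw [hres]
        refine ⟨hu1, by rw [hu2, ih2], by simp [hfind], by omega, ?_, ?_, ?_⟩
        · intro x hx
          exact pvUnion_Ntv ih1 hva hfKb (ih5 x hx)
        · intro t ht hbt _
          rcases Nat.lt_or_ge t K with htK | htK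
          · by_cases hc2 : 2 ≤ ((List.range K).filter b).length
            · exact pvUnion_Ntv ih1 hva hfKb (ih6 t htK hbt hc2)
            · -- exactly one server so far: it is t0, merged directly by this union
              have hone : ((List.range K).filter b).length = 1 := by omega
              obtain ⟨y, hy⟩ := List.length_eq_one_iff.mp hone
              have hyt0 : y = t0 := by
                have h' := ht0mem
                rw [hy] at h'
                exact (List.mem_singleton.mp h').symm
              have htt0 : t = t0 := by
                have htmem : t ∈ (List.range K).filter b := by
                  rw [List.mem_filter]
                  exact ⟨by simpa using htK, hbt⟩
                rw [hy, hyt0] at htmem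
                simpa using htmem
              rw [htt0]
              exact (pvUnion_newNtv ih1 hva hfKb hne).1
          · have : t = K := by omega
            rw [this]
            exact (pvUnion_newNtv ih1 hva hfKb hne).2
        · intro x hx havoid
          have hsx : pvSgl r.1 x :=
            ih7 x hx (fun t ht hbt => havoid t (by omega) hbt)
          exact pvUnion_Sgl ih1 hva hfKb
            (havoid t0 (by omega) hbt0) (havoid K (by omega) hbK) hsx
    · -- not a server: nothing changes
      have hbK' : b K = false := by simpa using hbK
      have hres : pvLine p b f (K+1) = r := by rw [hunf, if_neg (by simp [hbK'])]
      have hfil : (List.range (K+1)).filter b = (List.range K).filter b := by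
        rw [List.range_succ, List.filter_append]
        simp [hbK']
      have hfind : (List.range (K+1)).find? b = (List.range K).find? b := by
        rw [List.range_succ, List.find?_append]
        rcases hcon : (List.range K).find? b with _ | t0
        · simp [hbK']
        · rfl
      rw [hres, hfil, hfind]
      refine ⟨ih1, ih2, ih3, ih4, ih5, ?_,
        fun x hx hav => ih7 x hx (fun t ht hbt => hav t (by omega) hbt)⟩
      intro t ht hbt h2
      have htK : t < K := by
        rcases Nat.lt_or_ge t K with h | h
        · exact h
        · have : t = K := by omega
          rw [this] at hbt
          rw [hbt] at hbK'
          simp at hbK'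
      exact ih6 t htK hbt h2

lemma pvPhase (M : Nat) (B : Nat → Nat → Bool) (F : Nat → Nat → Nat) (Kf : Nat → Nat)
    (p : List Nat) (hV : pvValid p)
    (hf : ∀ l, l < M → ∀ t, t < Kf l → B l t = true → F l t < p.length)
    (hinj : ∀ l, l < M → ∀ t₁ t₂, t₁ < Kf l → t₂ < Kf l → t₁ ≠ t₂ →
      B l t₁ = true → B l t₂ = true → F l t₁ ≠ F l t₂) :
    pvValid ((List.range M).foldl (fun p l => (pvLine p (B l) (F l) (Kf l)).1) p) ∧
    ((List.range M).foldl (fun p l => (pvLine p (B l) (F l) (Kf l)).1) p).length = p.length ∧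
    (∀ x, pvNtv p x →
      pvNtv ((List.range M).foldl (fun p l => (pvLine p (B l) (F l) (Kf l)).1) p) x) ∧
    (∀ l, l < M → ∀ t, t < Kf l → B l t = true →
      2 ≤ ((List.range (Kf l)).filter (B l)).length →
      pvNtv ((List.range M).foldl (fun p l => (pvLine p (B l) (F l) (Kf l)).1) p) (F l t)) ∧
    (∀ x, pvSgl p x →
      (∀ l, l < M → ∀ t, t < Kf l → B l t = true →
        2 ≤ ((List.range (Kf l)).filter (B l)).length → F l t ≠ x) →
      pvSgl ((List.range M).foldl (fun p l => (pvLine p (B l) (F l) (Kf l)).1) p) x) := by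
  induction M with
  | zero =>
    refine ⟨hV, rfl, fun x h => h, ?_, fun x h _ => h⟩
    intro l hl
    omega
  | succ M IH =>
    obtain ⟨ih1, ih2, ih3, ih4, ih5⟩ := IH
      (fun l hl => hf l (by omega))
      (fun l hl => hinj l (by omega))
    set q := (List.range M).foldl (fun p l => (pvLine p (B l) (F l) (Kf l)).1) p with hq
    have hunf : (List.range (M+1)).foldl (fun p l => (pvLine p (B l) (F l) (Kf l)).1) p =
        (pvLine q (B M) (F M) (Kf M)).1 := by
      rw [List.range_succ, List.foldl_append, List.foldl_cons, List.foldl_nil]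
    obtain ⟨hl1, hl2, _, hl4, hl5, hl6, hl7⟩ := pvLine_spec q (B M) (F M) (Kf M) ih1
      (fun t ht hbt => by rw [ih2]; exact hf M (by omega) t ht hbt)
      (hinj M (by omega))
    rw [hunf]
    refine ⟨hl1, by rw [hl2, ih2], fun x hx => hl5 x (ih3 x hx), ?_, ?_⟩
    · intro l hl t ht hbt hcnt
      rcases Nat.lt_or_ge l M with hlM | hlM
      · exact hl5 _ (ih4 l hlM t ht hbt hcnt)
      · have hlM' : l = M := by omega
        subst hlM'
        exact hl6 t ht hbt hcnt
    · intro x hx havoid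
      have hsq : pvSgl q x := ih5 x hx (fun l hl => havoid l (by omega))
      by_cases hcnt : ((List.range (Kf M)).filter (B M)).length ≤ 1
      · rw [hl4 hcnt]
        exact hsq
      · exact hl7 x hsq (fun t ht hbt => havoid M (by omega) t ht hbt (by omega))

lemma pvCollect (L : List Nat) : ∀ (acc p : List Nat), pvValid p →
    (L.foldl (fun (s : List Nat × List Nat) c =>
      ((s.1 ++ [(pvFind s.2.length s.2 c).1], (pvFind s.2.length s.2 c).2))) (acc, p)).1 =
      acc ++ L.map (pvRoot p) := by
  induction L with
  | nil => intro acc p _; simp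
  | cons c L IH =>
    intro acc p hV
    obtain ⟨h1, h2, h3, h4⟩ := pvFind_top p c hV
    rw [List.foldl_cons]
    have := IH (acc ++ [(pvFind p.length p c).1]) (pvFind p.length p c).2 h2
    rw [this, h1]
    have hmap : L.map (pvRoot (pvFind p.length p c).2) = L.map (pvRoot p) :=
      List.map_congr_left (fun a _ => h4 a)
    rw [hmap]
    simp

lemma pvRangeMul (m n : Nat) :
    (List.range m).flatMap (fun i => (List.range n).map (fun j => i * n + j)) =
      List.range (m * n) := by
  induction m with
  | zero => simp
  | succ m IH =>
    rw [List.range_succ, List.flatMap_append, IH]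
    have h1 : (m + 1) * n = m * n + n := by ring
    rw [h1, List.range_add]
    simp [Nat.add_comm]

lemma pvCountP_eq_sum (q : Nat → Bool) : ∀ (xs : List Nat) (S : Finset Nat),
    (∀ a ∈ xs, a ∈ S) →
    xs.countP q = ∑ a ∈ S, (if q a = true then xs.count a else 0) := by
  intro xs
  induction xs with
  | nil => intro S _; simp
  | cons x xs IH =>
    intro S hS
    have hx : x ∈ S := hS x (List.mem_cons_self)
    have hS' : ∀ a ∈ xs, a ∈ S := fun a ha => hS a (List.mem_cons_of_mem _ ha)
    have hsplit : ∀ a : Nat, (if q a = true then (x :: xs).count a else 0) =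
        (if q a = true then xs.count a else 0) +
          (if a = x then (if q a = true then 1 else 0) else 0) := by
      intro a
      rw [List.count_cons]
      by_cases hax : a = x
      · subst hax
        by_cases hqa : q a = true <;> simp [hqa]
      · have hbx : (x == a) = false := beq_eq_false_iff_ne.mpr (fun h => hax h.symm)
        by_cases hqa : q a = true <;> simp [hqa, hbx, hax]
    calc (x :: xs).countP q
        = xs.countP q + (if q x = true then 1 else 0) := List.countP_cons
      _ = (∑ a ∈ S, (if q a = true then xs.count a else 0)) + (if q x = true then 1 else 0) := by
          rw [IH S hS']
      _ = ∑ a ∈ S, ((if q a = true then xs.count a else 0) +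
            (if a = x then (if q a = true then 1 else 0) else 0)) := by
          rw [Finset.sum_add_distrib,
            Finset.sum_ite_eq' S x (fun a => if q a = true then 1 else 0), if_pos hx]
      _ = ∑ a ∈ S, (if q a = true then (x :: xs).count a else 0) :=
          Finset.sum_congr rfl (fun a _ => (hsplit a).symm)

lemma pvSumDedup (q : Nat → Bool) (xs : List Nat) :
    ((PySem.List.dedup xs).map (fun k => if q k = true then xs.count k else 0)).sum =
      xs.countP q := by
  have hnd := PySem.List.nodup_dedup xs
  have hTF : (PySem.List.dedup xs).toFinset = xs.toFinset := by
    ext a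
    simp
  calc ((PySem.List.dedup xs).map (fun k => if q k = true then xs.count k else 0)).sum
      = (PySem.List.dedup xs).toFinset.sum (fun k => if q k = true then xs.count k else 0) :=
        (List.sum_toFinset _ hnd).symm
    _ = xs.toFinset.sum (fun k => if q k = true then xs.count k else 0) := by rw [hTF]
    _ = xs.countP q := (pvCountP_eq_sum q xs xs.toFinset (by simp)).symm

lemma pvTwoMem {l : List Nat} {a b : Nat} (ha : a ∈ l) (hb : b ∈ l) (hab : a ≠ b) :
    1 < l.length := by
  by_contra h
  push Not at h
  match l, h with
  | [], _ => simp at ha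
  | [x], _ =>
    rw [List.mem_singleton] at ha hb
    omega
  | x :: y :: t, h => simp at h

lemma pvTwoDistinct (N : Nat) (P : Nat → Bool) (c : Nat) (hc : c < N) (hP : P c = true) :
    1 < (List.range N).countP P ↔ ∃ d, d < N ∧ d ≠ c ∧ P d = true := by
  rw [List.countP_eq_length_filter]
  constructor
  · intro h
    rcases hfil : (List.range N).filter P with _ | ⟨a, _ | ⟨b, t2⟩⟩
    · rw [hfil] at h; simp at h
    · rw [hfil] at h; simp at h
    · have hnd : ((List.range N).filter P).Nodup := List.Nodup.filter _ List.nodup_range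
      rw [hfil] at hnd
      have hab : a ≠ b := by
        intro hcon
        have := (List.nodup_cons.mp hnd).1
        rw [hcon] at this
        exact this List.mem_cons_self
      have hamem : a ∈ (List.range N).filter P := by rw [hfil]; simp
      have hbmem : b ∈ (List.range N).filter P := by rw [hfil]; simp
      obtain ⟨haN, hPa⟩ := List.mem_filter.mp hamem
      obtain ⟨hbN, hPb⟩ := List.mem_filter.mp hbmem
      rw [List.mem_range] at haN hbN
      by_cases hac : a = c
      · exact ⟨b, hbN, by omega, hPb⟩
      · exact ⟨a, haN, hac, hPa⟩
  · rintro ⟨d, hd, hdc, hPd⟩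
    have hcmem : c ∈ (List.range N).filter P :=
      List.mem_filter.mpr ⟨List.mem_range.mpr hc, hP⟩
    have hdmem : d ∈ (List.range N).filter P :=
      List.mem_filter.mpr ⟨List.mem_range.mpr hd, hPd⟩
    exact pvTwoMem hdmem hcmem hdc

lemma pvMapGetD {α β : Type} (l : List α) (d : α) (h : α → β) :
    l.map h = (List.range l.length).map (fun i => h (l.getD i d)) := by
  induction l using List.reverseRecOn with
  | nil => simp
  | append_singleton l a IH =>
    rw [List.map_append, List.length_append, List.length_singleton, List.range_succ,
      List.map_append, IH]
    congr 1
    · apply List.map_congr_left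
      intro i hi
      rw [List.mem_range] at hi
      rw [List.getD_append _ _ _ _ hi]
    · simp only [List.map_cons, List.map_nil]
      congr 2
      rw [List.getD_eq_getElem _ _ (by simp)]
      simp

def pvSrv (grid : List (List Int)) (i j : Nat) : Bool := (grid.getD i []).getD j 0 == 1

def pvRC (grid : List (List Int)) (n i : Nat) : Nat :=
  ((List.range n).filter (fun j => pvSrv grid i j)).length

def pvCC (grid : List (List Int)) (m j : Nat) : Nat :=
  ((List.range m).filter (fun i => pvSrv grid i j)).length

lemma pvEnc_lt {m n i j : Nat} (hi : i < m) (hj : j < n) : i * n + j < m * n := by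
  have h1 : i * n + j < (i + 1) * n := by
    have : (i + 1) * n = i * n + n := by ring
    omega
  have h2 : (i + 1) * n ≤ m * n := Nat.mul_le_mul_right n (by omega)
  omega

lemma pvEnc_inj {n i j i' j' : Nat} (hj : j < n) (hj' : j' < n)
    (h : i * n + j = i' * n + j') : i = i' ∧ j = j' := by
  have hn : 0 < n := by omega
  have hj0 : j / n = 0 := Nat.div_eq_of_lt hj
  have hj'0 : j' / n = 0 := Nat.div_eq_of_lt hj'
  have h1 : (i * n + j) / n = i := by
    rw [Nat.mul_comm i n, Nat.mul_add_div hn, hj0]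
    omega
  have h2 : (i' * n + j') / n = i' := by
    rw [Nat.mul_comm i' n, Nat.mul_add_div hn, hj'0]
    omega
  have h3 : i = i' := by rw [← h1, ← h2, h]
  refine ⟨h3, ?_⟩
  rw [h3] at h
  omega

lemma pvRange_base (N : Nat) :
    pvValid (List.range N) ∧ (∀ x, pvRoot (List.range N) x = x) ∧
      ∀ x, pvSgl (List.range N) x := by
  have hstep : ∀ x, pvStep (List.range N) x = x := by
    intro x
    by_cases hx : x < N
    · rw [pvStep, List.getD_eq_getElem _ _ (by simpa using hx)]
      exact List.getElem_range _
    · exact pvStep_ge (by simpa using hx)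
  have hV : pvValid (List.range N) := by
    constructor
    · intro i hi
      rw [hstep i]; exact hi
    · intro x
      exact ⟨0, by rw [Function.iterate_zero_apply]; exact hstep x⟩
  have hroot : ∀ x, pvRoot (List.range N) x = x := fun x => pvRoot_of_isRoot (hstep x)
  exact ⟨hV, hroot, fun x => ⟨hroot x, fun d _ hdx => by rw [hroot d]; exact hdx⟩⟩

lemma pvPhases (grid : List (List Int)) :
    pvValid ((List.range (grid.headD []).length).foldl
        (fun p j => (pvLine p (fun i => pvSrv grid i j)
          (fun i => i * (grid.headD []).length + j) grid.length).1)
        ((List.range grid.length).foldl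
          (fun p i => (pvLine p (fun j => pvSrv grid i j)
            (fun j => i * (grid.headD []).length + j) (grid.headD []).length).1)
          (List.range (grid.length * (grid.headD []).length)))) ∧
    ((List.range (grid.headD []).length).foldl
        (fun p j => (pvLine p (fun i => pvSrv grid i j)
          (fun i => i * (grid.headD []).length + j) grid.length).1)
        ((List.range grid.length).foldl
          (fun p i => (pvLine p (fun j => pvSrv grid i j)
            (fun j => i * (grid.headD []).length + j) (grid.headD []).length).1)
          (List.range (grid.length * (grid.headD []).length)))).length =
      grid.length * (grid.headD []).length ∧
    ∀ i j, i < grid.length → j < (grid.headD []).length →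
      ((pvSrv grid i j = true ∧ (2 ≤ pvRC grid (grid.headD []).length i ∨
          2 ≤ pvCC grid grid.length j)) →
        pvNtv ((List.range (grid.headD []).length).foldl
          (fun p j => (pvLine p (fun i => pvSrv grid i j)
            (fun i => i * (grid.headD []).length + j) grid.length).1)
          ((List.range grid.length).foldl
            (fun p i => (pvLine p (fun j => pvSrv grid i j)
              (fun j => i * (grid.headD []).length + j) (grid.headD []).length).1)
            (List.range (grid.length * (grid.headD []).length))))
          (i * (grid.headD []).length + j)) ∧
      (¬(pvSrv grid i j = true ∧ (2 ≤ pvRC grid (grid.headD []).length i ∨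
          2 ≤ pvCC grid grid.length j)) →
        pvSgl ((List.range (grid.headD []).length).foldl
          (fun p j => (pvLine p (fun i => pvSrv grid i j)
            (fun i => i * (grid.headD []).length + j) grid.length).1)
          ((List.range grid.length).foldl
            (fun p i => (pvLine p (fun j => pvSrv grid i j)
              (fun j => i * (grid.headD []).length + j) (grid.headD []).length).1)
            (List.range (grid.length * (grid.headD []).length))))
          (i * (grid.headD []).length + j)) := by
  set m := grid.length with hm
  set n := (grid.headD []).length with hn
  set N := m * n with hN
  obtain ⟨hV0, hroot0, hsgl0⟩ := pvRange_base N
  have hlen0 : (List.range N).length = N := List.length_range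
  obtain ⟨h11, h12, h13, h14, h15⟩ := pvPhase m
    (fun i => fun j => pvSrv grid i j) (fun i => fun j => i * n + j) (fun _ => n)
    (List.range N) hV0
    (fun i hi t ht hbt => by rw [hlen0]; exact pvEnc_lt hi ht)
    (fun i hi t₁ t₂ h1 h2 h3 _ _ => by
      intro hcon
      exact h3 (pvEnc_inj h1 h2 hcon).2)
  set q1 := (List.range m).foldl
    (fun p i => (pvLine p (fun j => pvSrv grid i j) (fun j => i * n + j) n).1)
    (List.range N) with hq1
  obtain ⟨h21, h22, h23, h24, h25⟩ := pvPhase n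
    (fun j => fun i => pvSrv grid i j) (fun j => fun i => i * n + j) (fun _ => m)
    q1 h11
    (fun j hj t ht hbt => by rw [h12, hlen0]; exact pvEnc_lt ht hj)
    (fun j hj t₁ t₂ h1 h2 h3 _ _ => by
      intro hcon
      exact h3 (pvEnc_inj hj hj hcon).1)
  refine ⟨h21, by rw [h22, h12, hlen0], ?_⟩
  intro i j hi hj
  constructor
  · rintro ⟨hsrv, hcase | hcase⟩
    · exact h23 _ (h14 i hi j hj hsrv hcase)
    · exact h24 j hj i hi hsrv hcase
  · intro hno
    have havoid1 : ∀ i', i' < m → ∀ j', j' < n → pvSrv grid i' j' = true →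
        2 ≤ ((List.range n).filter (fun j => pvSrv grid i' j)).length →
        i' * n + j' ≠ i * n + j := by
      intro i' hi' j' hj' hsrv' hcnt hcon
      obtain ⟨hii, hjj⟩ := pvEnc_inj hj' hj hcon
      subst hii; subst hjj
      exact hno ⟨hsrv', Or.inl hcnt⟩
    have havoid2 : ∀ j', j' < n → ∀ i', i' < m → pvSrv grid i' j' = true →
        2 ≤ ((List.range m).filter (fun i => pvSrv grid i j')).length →
        i' * n + j' ≠ i * n + j := by
      intro j' hj' i' hi' hsrv' hcnt hcon
      obtain ⟨hii, hjj⟩ := pvEnc_inj hj' hj hcon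
      subst hii; subst hjj
      exact hno ⟨hsrv', Or.inr hcnt⟩
    exact h25 _ (h15 _ (hsgl0 _) havoid1) havoid2

lemma pvCountP_getD {α : Type} (l : List α) (d : α) (t : α → Bool) :
    l.countP t = (List.range l.length).countP (fun i => t (l.getD i d)) := by
  have hm : l.map id = (List.range l.length).map (fun i => id (l.getD i d)) := pvMapGetD l d id
  simp only [List.map_id, id] at hm
  conv_lhs => rw [hm]
  rw [List.countP_map]
  rfl

def pvP2 (grid : List (List Int)) : List Nat :=
  (List.range (grid.headD []).length).foldl
    (fun p j => (pvLine p (fun i => pvSrv grid i j)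
      (fun i => i * (grid.headD []).length + j) grid.length).1)
    ((List.range grid.length).foldl
      (fun p i => (pvLine p (fun j => pvSrv grid i j)
        (fun j => i * (grid.headD []).length + j) (grid.headD []).length).1)
      (List.range (grid.length * (grid.headD []).length)))

lemma pvP2_spec (grid : List (List Int)) :
    pvValid (pvP2 grid) ∧
    (pvP2 grid).length = grid.length * (grid.headD []).length ∧
    ∀ i j, i < grid.length → j < (grid.headD []).length →
      ((pvSrv grid i j = true ∧ (2 ≤ pvRC grid (grid.headD []).length i ∨
          2 ≤ pvCC grid grid.length j)) →
        pvNtv (pvP2 grid) (i * (grid.headD []).length + j)) ∧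
      (¬(pvSrv grid i j = true ∧ (2 ≤ pvRC grid (grid.headD []).length i ∨
          2 ≤ pvCC grid grid.length j)) →
        pvSgl (pvP2 grid) (i * (grid.headD []).length + j)) := pvPhases grid

def pvRs (grid : List (List Int)) : List Nat :=
  (List.range (grid.length * (grid.headD []).length)).map (pvRoot (pvP2 grid))

lemma pvA_eq (grid : List (List Int)) :
    countServers_UF grid =
      Int.ofNat ((pvRs grid).countP (fun x => decide (1 < (pvRs grid).count x))) := by
  set m := grid.length with hm
  set n := (grid.headD []).length with hn
  have h0 : countServers_UF grid =
      (PySem.Dict.counter (((List.range m).foldl (fun (s : List Nat × List Nat) i =>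
        (List.range n).foldl (fun (s : List Nat × List Nat) j =>
          let r := pvFind s.2.length s.2 (i * n + j)
          (s.1 ++ [r.1], r.2)) s) ([], pvP2 grid)).1)).items.foldl
        (fun acc kv => if 1 < kv.2 then acc + kv.2 else acc) 0 := rfl
  have hfun : (fun (s : List Nat × List Nat) i =>
      (List.range n).foldl (fun (s : List Nat × List Nat) j =>
        let r := pvFind s.2.length s.2 (i * n + j)
        (s.1 ++ [r.1], r.2)) s) =
      (fun (s : List Nat × List Nat) i =>
        ((List.range n).map (fun j => i * n + j)).foldl
          (fun (s : List Nat × List Nat) c =>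
            ((s.1 ++ [(pvFind s.2.length s.2 c).1], (pvFind s.2.length s.2 c).2))) s) := by
    funext s i
    rw [List.foldl_map]
  have h1 : ((List.range m).foldl (fun (s : List Nat × List Nat) i =>
      (List.range n).foldl (fun (s : List Nat × List Nat) j =>
        let r := pvFind s.2.length s.2 (i * n + j)
        (s.1 ++ [r.1], r.2)) s) ([], pvP2 grid)).1 = pvRs grid := by
    rw [hfun, ← List.foldl_flatMap, pvRangeMul m n]
    have := pvCollect (List.range (m * n)) [] (pvP2 grid) (pvP2_spec grid).1
    rw [this, List.nil_append]
    rfl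
  rw [h0, h1]
  rw [PySem.Dict.items_counter, ← PySem.List.dedup_eq_ofList, List.foldl_map]
  have hcong : (fun (acc : Int) (k : Nat) =>
      if 1 < ((pvRs grid).count k : Int) then acc + ((pvRs grid).count k : Int) else acc) =
      (fun (acc : Int) (k : Nat) =>
        acc + (if 1 < (pvRs grid).count k then ((pvRs grid).count k : Int) else 0)) := by
    funext acc k
    by_cases h : 1 < (pvRs grid).count k
    · rw [if_pos ((Nat.one_lt_cast).mpr h), if_pos h]
    · rw [if_neg (fun hc => h (Nat.one_lt_cast.mp hc)), if_neg h]
      simp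
  rw [hcong, PySem.List.foldl_add]
  have hmap : (PySem.List.dedup (pvRs grid)).map
      (fun k => if 1 < (pvRs grid).count k then ((pvRs grid).count k : Int) else 0) =
      ((PySem.List.dedup (pvRs grid)).map
        (fun k => if (fun x => decide (1 < (pvRs grid).count x)) k = true
          then (pvRs grid).count k else 0)).map (fun c : Nat => (c : Int)) := by
    rw [List.map_map]
    apply List.map_congr_left
    intro k _
    by_cases h : 1 < (pvRs grid).count k <;> simp [h]
  rw [hmap, ← Nat.cast_list_sum, pvSumDedup]
  simp [Int.ofNat_eq_natCast]

lemma pvB_eq (grid : List (List Int)) :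
    countServers_UF_alt grid = Int.ofNat (((List.range grid.length).map (fun i =>
      ((List.range (grid.headD []).length).filter (fun j =>
        pvSrv grid i j && (decide (1 < pvRC grid (grid.headD []).length i) ||
          decide (1 < pvCC grid grid.length j)))).length)).sum) := by
  set m := grid.length with hm
  set n := (grid.headD []).length with hn
  have h0 : countServers_UF_alt grid = Int.ofNat ((((grid.map (fun row =>
      ((List.range n).filter (fun j => row.getD j 0 == 1)).length)).zip grid).map (fun rr =>
      ((List.range n).filter (fun j => rr.2.getD j 0 == 1 &&
        (decide (1 < rr.1) || decide (1 < ((List.range n).map (fun j' =>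
          (grid.filter (fun row => row.getD j' 0 == 1)).length)).getD j 0)))).length)).sum) := rfl
  rw [h0]
  congr 1
  have hz : (grid.map (fun row =>
      ((List.range n).filter (fun j => row.getD j 0 == 1)).length)).zip grid =
      grid.map (fun row => (((List.range n).filter (fun j => row.getD j 0 == 1)).length, row)) := by
    calc (grid.map (fun row => ((List.range n).filter (fun j => row.getD j 0 == 1)).length)).zip grid
        = (grid.map (fun row => ((List.range n).filter (fun j => row.getD j 0 == 1)).length)).zip
            (grid.map id) := by rw [List.map_id]
      _ = _ := by rw [List.zip_map']; rfl
  rw [hz, List.map_map]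
  have hgd := pvMapGetD grid [] (fun row =>
      ((List.range n).filter (fun j => row.getD j 0 == 1 &&
        (decide (1 < ((List.range n).filter (fun j'' => row.getD j'' 0 == 1)).length) ||
          decide (1 < ((List.range n).map (fun j' =>
            (grid.filter (fun row' => row'.getD j' 0 == 1)).length)).getD j 0)))).length)
  rw [show ((fun rr : Nat × List Int =>
      ((List.range n).filter (fun j => rr.2.getD j 0 == 1 &&
        (decide (1 < rr.1) || decide (1 < ((List.range n).map (fun j' =>
          (grid.filter (fun row => row.getD j' 0 == 1)).length)).getD j 0)))).length) ∘
      (fun row => (((List.range n).filter (fun j => row.getD j 0 == 1)).length, row))) =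
      (fun row : List Int =>
        ((List.range n).filter (fun j => row.getD j 0 == 1 &&
          (decide (1 < ((List.range n).filter (fun j'' => row.getD j'' 0 == 1)).length) ||
            decide (1 < ((List.range n).map (fun j' =>
              (grid.filter (fun row' => row'.getD j' 0 == 1)).length)).getD j 0)))).length)
    from rfl]
  rw [hgd]
  congr 1
  apply List.map_congr_left
  intro i hi
  rw [List.mem_range] at hi
  congr 1
  apply List.filter_congr
  intro j hj
  rw [List.mem_range] at hj
  have hcc : ((List.range n).map (fun j' =>
      (grid.filter (fun row' => row'.getD j' 0 == 1)).length)).getD j 0 =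
      pvCC grid m j := by
    rw [PySem.List.getD_map_range _ _ _ _ hj]
    rw [pvCC, ← List.countP_eq_length_filter, ← List.countP_eq_length_filter]
    exact (pvCountP_getD grid [] (fun row' => row'.getD j 0 == 1)).symm ▸ rfl
  rw [hcc]
  rfl

lemma pvCell (grid : List (List Int)) {i j : Nat} (hi : i < grid.length)
    (hj : j < (grid.headD []).length) :
    decide (1 < (((List.range (grid.length * (grid.headD []).length)).map
        (pvRoot (pvP2 grid))).count
        (pvRoot (pvP2 grid) (i * (grid.headD []).length + j)))) =
      (pvSrv grid i j && (decide (1 < pvRC grid (grid.headD []).length i) ||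
        decide (1 < pvCC grid grid.length j))) := by
  set m := grid.length with hm
  set n := (grid.headD []).length with hn
  have hcN : i * n + j < m * n := pvEnc_lt hi hj
  have hcount : ((List.range (m * n)).map (pvRoot (pvP2 grid))).count
      (pvRoot (pvP2 grid) (i * n + j)) =
      (List.range (m * n)).countP
        (fun d => pvRoot (pvP2 grid) d == pvRoot (pvP2 grid) (i * n + j)) := by
    rw [List.count_eq_countP, List.countP_map]
    rfl
  have h2 := pvTwoDistinct (m * n)
    (fun d => pvRoot (pvP2 grid) d == pvRoot (pvP2 grid) (i * n + j))
    (i * n + j) hcN (by simp)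
  obtain ⟨hV2, hlen2, hcell⟩ := pvP2_spec grid
  obtain ⟨hpos, hneg⟩ := hcell i j hi hj
  have hiff : (1 < ((List.range (m * n)).map (pvRoot (pvP2 grid))).count
      (pvRoot (pvP2 grid) (i * n + j))) ↔
      (pvSrv grid i j = true ∧ (1 < pvRC grid n i ∨ 1 < pvCC grid m j)) := by
    rw [hcount, h2]
    constructor
    · rintro ⟨d, hd1, hd2, hd3⟩
      rw [beq_iff_eq] at hd3
      by_contra hno
      have hno' : ¬(pvSrv grid i j = true ∧
          (2 ≤ pvRC grid n i ∨ 2 ≤ pvCC grid m j)) := by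
        intro ⟨ha, hb⟩
        exact hno ⟨ha, by rcases hb with h | h
                          · exact Or.inl (by omega)
                          · exact Or.inr (by omega)⟩
      obtain ⟨hr1, hr2⟩ := hneg hno'
      exact hr2 d (by rw [hlen2]; exact hd1) hd2 (hd3.trans hr1)
    · rintro ⟨hsrv, hcase⟩
      have htouch : pvSrv grid i j = true ∧
          (2 ≤ pvRC grid n i ∨ 2 ≤ pvCC grid m j) := by
        refine ⟨hsrv, ?_⟩
        rcases hcase with h | h
        · exact Or.inl (by omega)
        · exact Or.inr (by omega)
      obtain ⟨d, hd1, hd2, hd3⟩ := hpos htouch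
      exact ⟨d, by rw [← hlen2]; exact hd1, hd2, by rw [beq_iff_eq]; exact hd3⟩
  have hrhs : (pvSrv grid i j && (decide (1 < pvRC grid n i) ||
      decide (1 < pvCC grid m j))) =
      decide (pvSrv grid i j = true ∧ (1 < pvRC grid n i ∨ 1 < pvCC grid m j)) := by
    cases hb : pvSrv grid i j
    · simp
    · by_cases h2' : 1 < pvRC grid n i <;> by_cases h3' : 1 < pvCC grid m j <;>
        simp [h2', h3']
  rw [hrhs, decide_eq_decide]
  exact hiff

theorem pvAB (grid : List (List Int)) : countServers_UF grid = countServers_UF_alt grid := by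
  rw [pvA_eq, pvB_eq]
  have h1 : pvRs grid =
      (List.range (grid.length * (grid.headD []).length)).map (pvRoot (pvP2 grid)) := rfl
  rw [h1]
  congr 1
  rw [List.countP_map]
  set P : Nat → Bool := fun x => decide (1 < List.count x
    (List.map (pvRoot (pvP2 grid))
      (List.range (grid.length * (grid.headD []).length)))) with hP
  rw [← pvRangeMul grid.length (grid.headD []).length, List.countP_flatMap]
  congr 1
  apply List.map_congr_left
  intro i hi
  rw [List.mem_range] at hi
  simp only [Function.comp_apply]
  rw [List.countP_map, List.countP_eq_length_filter]
  congr 1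
  apply List.filter_congr
  intro j hj
  rw [List.mem_range] at hj
  simp only [Function.comp_apply, hP]
  exact pvCell grid hi hj

-- ===== VERDICT (by name: the statement is the Claim_ definition above) =====
theorem countServers_UF_spec : Claim_equal_countServers_UF := by
  intro grid _ _
  exact pvAB grid
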